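-- pv_equiv track=rewrite | github.com/EdumallaThirupathaiah/intern-project | python parallel_processor.py | analyze_review
-- ===== SOURCE A (Python) =====
-- positive_words = ["good", "excellent", "love", "amazing", "best"]
--
-- negative_words = ["bad", "terrible", "hate", "worst"]
--
-- def analyze_review(review):
--     score = 0
--     words = review.lower().split()
--
--     for word in words:
--         if word in positive_words:
--             score += 1
--         elif word in negative_words:
--             score -= 1
--
--     if score > 0:
--         label = "Positive"
--     elif score < 0:
--         label = "Negative"
--     else:
--         label = "Neutral"
--
--     return (review.strip(), score, label)
-- ===== SOURCE B (Python) =====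
-- positive_words = ["good", "excellent", "love", "amazing", "best"]
--
-- negative_words = ["bad", "terrible", "hate", "worst"]
--
-- def analyze_review(review):
--     counts = {}
--     for w in review.lower().split():
--         counts[w] = counts.get(w, 0) + 1
--     score = sum(counts.get(w, 0) for w in positive_words) \
--           - sum(counts.get(w, 0) for w in negative_words)
--     label = ("Neutral", "Positive", "Negative")[(score > 0) - (score < 0)]
--     return (review.strip(), score, label)
-- ===== Notes on version B (the rewrite author's own statement) =====
-- stated objective: alternative
-- what changed: B first builds a word-frequency dict of the review in one pass, then computes the score by looking up each fixed keyword in that dict (instead of A's per-word membership branches), and picks the label by sign-indexing a fixed tuple instead of an if/elif chain.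
import Mathlib
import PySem

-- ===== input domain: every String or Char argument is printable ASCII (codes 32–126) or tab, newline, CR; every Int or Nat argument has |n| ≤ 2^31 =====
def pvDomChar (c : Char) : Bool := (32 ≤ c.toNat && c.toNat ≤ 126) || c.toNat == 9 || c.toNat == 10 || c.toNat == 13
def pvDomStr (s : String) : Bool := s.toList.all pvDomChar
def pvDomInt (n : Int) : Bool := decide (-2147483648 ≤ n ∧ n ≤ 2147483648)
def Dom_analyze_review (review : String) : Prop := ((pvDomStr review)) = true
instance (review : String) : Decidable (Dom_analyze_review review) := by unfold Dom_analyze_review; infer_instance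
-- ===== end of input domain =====

-- B builds a word-frequency dict once, scores by looking up the fixed keyword tables in it,
-- and picks the label by sign-indexing a fixed tuple; objective: alternative (same cost).

def positive_words : List String := ["good", "excellent", "love", "amazing", "best"]

def negative_words : List String := ["bad", "terrible", "hate", "worst"]

-- ===== PORT A =====
def analyze_review (review : String) : String × Int × String :=
  let words := PySem.Str.split₀ (PySem.Str.lower review)
  let score : Int := words.foldl (fun score word =>
      if word ∈ positive_words then score + 1
      else if word ∈ negative_words then score - 1
      else score) 0
  let label := if score > 0 then "Positive" else if score < 0 then "Negative" else "Neutral"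
  (PySem.Str.strip review, score, label)

-- ===== PORT B =====
def analyze_review_alt (review : String) : String × Int × String :=
  let counts : PySem.Dict String Int :=
    (PySem.Str.split₀ (PySem.Str.lower review)).foldl
      (fun d w => d.insert w (d.getD w 0 + 1)) PySem.Dict.empty
  let score : Int :=
      (positive_words.map (fun w => counts.getD w 0)).sum
    - (negative_words.map (fun w => counts.getD w 0)).sum
  -- tuple index (score>0)-(score<0): always in {-1,0,1}, hence in range of the 3-tuple
  let label := PySem.List.pyGetD ["Neutral", "Positive", "Negative"]
      ((if score > 0 then (1:Int) else 0) - (if score < 0 then (1:Int) else 0)) ""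
  (PySem.Str.strip review, score, label)

-- ===== PRECONDITION & SPEC =====
def Spec_analyze_review (review : String) (out : String × Int × String) : Prop := out = analyze_review_alt review
instance (review : String) (out : String × Int × String) : Decidable (Spec_analyze_review review out) := by unfold Spec_analyze_review; infer_instance

-- ===== CLAIM (what is proved, stated in full; the proofs are below) =====
def Claim_equal_analyze_review : Prop := ∀ (review : String), Dom_analyze_review review → Spec_analyze_review review (analyze_review review)

-- ===== LEMMAS AND PROOFS =====

-- summing a 0/1 indicator of equality with w over a duplicate-free keyword list is a membership test
lemma sum_indicator (ks : List String) (hk : ks.Nodup) (w : String) :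
    ((ks.map (fun k => if w = k then (1:Int) else 0)).sum) = if w ∈ ks then 1 else 0 := by
  induction ks with
  | nil => simp
  | cons k ks ihk =>
    by_cases hkw : w = k
    · subst hkw
      have hw : w ∉ ks := (List.nodup_cons.mp hk).1
      have hz : (ks.map (fun k1 => if w = k1 then (1:Int) else 0)).sum = 0 := by
        apply List.sum_eq_zero
        intro x hx
        rw [List.mem_map] at hx
        obtain ⟨k1, hk1, rfl⟩ := hx
        have hne : w ≠ k1 := fun h => hw (h ▸ hk1)
        simp [hne]
      simp [hz]
    · simp [hkw, ihk hk.of_cons]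

-- summing the count of each (distinct) keyword over ws counts ws's words that are keywords
lemma sum_count_eq_countP (ks : List String) (hk : ks.Nodup) (ws : List String) :
    ((ks.map (fun k => (ws.count k : Int))).sum) = (ws.countP (fun w => decide (w ∈ ks)) : Int) := by
  induction ws with
  | nil => simp
  | cons w ws ih =>
    have hcnt : ∀ k : String, (w :: ws).count k = ws.count k + if w = k then 1 else 0 := by
      intro k
      rw [List.count_cons]
      by_cases h : k = w
      · subst h; simp
      · have h2 : w ≠ k := Ne.symm h
        simp [h2]
    calc ((ks.map (fun k => (((w :: ws).count k : Nat) : Int))).sum)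
        = ((ks.map (fun k => ((ws.count k : Nat) : Int) + (if w = k then (1:Int) else 0))).sum) := by
          apply congrArg; apply List.map_congr_left; intro k _
          rw [hcnt k]; push_cast; split <;> simp
      _ = ((ks.map (fun k => ((ws.count k : Nat) : Int))).sum)
          + ((ks.map (fun k => (if w = k then (1:Int) else 0))).sum) := by
          rw [← List.sum_map_add]
      _ = (ws.countP (fun w => decide (w ∈ ks)) : Int) + (if w ∈ ks then 1 else 0) := by
          rw [ih, sum_indicator ks hk w]
      _ = ((w :: ws).countP (fun w => decide (w ∈ ks)) : Int) := by
          rw [List.countP_cons]; by_cases h : w ∈ ks <;> simp [h]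

lemma pos_neg_disjoint (w : String) (h : w ∈ positive_words) : w ∉ negative_words := by
  fin_cases h <;> decide

lemma foldl_score (ws : List String) (s : Int) :
    ws.foldl (fun score word =>
      if word ∈ positive_words then score + 1
      else if word ∈ negative_words then score - 1
      else score) s
    = s + (ws.countP (fun w => decide (w ∈ positive_words)) : Int)
        - (ws.countP (fun w => decide (w ∈ negative_words)) : Int) := by
  induction ws generalizing s with
  | nil => simp
  | cons w ws ih =>
    simp only [List.foldl_cons, List.countP_cons, ih]
    by_cases hp : w ∈ positive_words
    · have hn := pos_neg_disjoint w hp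
      simp [hp, hn]
      omega
    · by_cases hn : w ∈ negative_words
      · simp [hp, hn]
        omega
      · simp [hp, hn]

-- the dict built by B's loop is the counter, so its lookups are counts
lemma counts_getD (ws : List String) (w : String) :
    (ws.foldl (fun d w => d.insert w (d.getD w 0 + 1)) PySem.Dict.empty).getD w 0
      = (ws.count w : Int) := by
  rw [PySem.Dict.foldl_insert_getD_add_one_eq_counter, PySem.Dict.getD_counter]

-- the two score computations agree on any word list
lemma score_eq (ws : List String) :
    ws.foldl (fun score word =>
      if word ∈ positive_words then score + 1
      else if word ∈ negative_words then score - 1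
      else score) (0 : Int)
    = (positive_words.map (fun w =>
          (ws.foldl (fun d w => d.insert w (d.getD w (0 : Int) + 1)) PySem.Dict.empty).getD w 0)).sum
      - (negative_words.map (fun w =>
          (ws.foldl (fun d w => d.insert w (d.getD w (0 : Int) + 1)) PySem.Dict.empty).getD w 0)).sum := by
  have h1 : ∀ ks : List String,
      (ks.map (fun w => (ws.foldl (fun d w => d.insert w (d.getD w 0 + 1)) PySem.Dict.empty).getD w 0)).sum
        = (ks.map (fun w => (ws.count w : Int))).sum := by
    intro ks; apply congrArg; apply List.map_congr_left; intro k _; exact counts_getD ws k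
  rw [h1, h1, foldl_score, sum_count_eq_countP positive_words (by decide) ws,
      sum_count_eq_countP negative_words (by decide) ws, zero_add]

-- the sign-indexed tuple lookup equals A's if/elif label chain
lemma label_eq (score : Int) :
    PySem.List.pyGetD ["Neutral", "Positive", "Negative"]
        ((if score > 0 then (1:Int) else 0) - (if score < 0 then (1:Int) else 0)) ""
    = if score > 0 then "Positive" else if score < 0 then "Negative" else "Neutral" := by
  by_cases hp : score > 0
  · have hn : ¬ score < 0 := by omega
    norm_num [hp, hn, PySem.List.pyGetD, PySem.List.pyGet?, PySem.List.pyIdx?]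
  · by_cases hn : score < 0
    · norm_num [hp, hn, PySem.List.pyGetD, PySem.List.pyGet?, PySem.List.pyIdx?]
    · norm_num [hp, hn, PySem.List.pyGetD, PySem.List.pyGet?, PySem.List.pyIdx?]

-- ===== VERDICT (by name: the statement is the Claim_ definition above) =====
theorem analyze_review_spec : Claim_equal_analyze_review := by
  intro review _
  unfold Spec_analyze_review
  simp only [analyze_review, analyze_review_alt, label_eq, score_eq]
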